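-- pv_equiv track=rewrite | github.com/nhavronskyi/CodeWars | codewars-python/src/codewars/seven/stone_pickaxe_crafting.py | stone_pick
-- ===== SOURCE A (Python) =====
-- def stone_pick(arr: list[str]):
--     cobblestone = 0
--     sticks = 0
--     res = 0
--     for e in arr:
--         if e == "Cobblestone":
--             cobblestone += 1
--         elif e == "Sticks":
--             sticks += 1
--         elif e == "Wood":
--             sticks += 4
--
--     while cobblestone >= 3:
--         if sticks >= 2:
--             cobblestone -= 3
--             sticks -= 2
--             res += 1
--         else:
--             return res
--     return res
-- ===== SOURCE B (Python) =====
-- def stone_pick(arr: list[str]):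
--     cobblestone = arr.count("Cobblestone")
--     sticks = arr.count("Sticks") + 4 * arr.count("Wood")
--     return min(cobblestone // 3, sticks // 2)
-- ===== Notes on version B (the rewrite author's own statement) =====
-- stated objective: simpler
-- what changed: Replaced the manual counting loop and the one-pickaxe-at-a-time while/decrement crafting loop by list.count tallies and the closed form min(cobblestone // 3, sticks // 2).
import Mathlib
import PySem

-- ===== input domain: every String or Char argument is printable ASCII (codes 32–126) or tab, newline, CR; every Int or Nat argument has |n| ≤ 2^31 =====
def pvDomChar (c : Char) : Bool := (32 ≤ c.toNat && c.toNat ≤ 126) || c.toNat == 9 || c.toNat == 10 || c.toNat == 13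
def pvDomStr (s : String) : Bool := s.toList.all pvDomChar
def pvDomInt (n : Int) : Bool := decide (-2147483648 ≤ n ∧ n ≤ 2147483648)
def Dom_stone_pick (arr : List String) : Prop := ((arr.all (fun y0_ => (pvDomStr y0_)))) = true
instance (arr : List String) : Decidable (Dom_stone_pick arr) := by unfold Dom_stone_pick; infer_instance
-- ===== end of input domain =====

-- B replaces A's counting loop and one-at-a-time while-crafting loop with list.count tallies and the closed form min(cobblestone // 3, sticks // 2) (simpler).


-- ===== PORT A =====
-- the while-loop of A: while cobblestone >= 3: if sticks >= 2: craft one; else return res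
def stone_pick_loop (cobblestone sticks res : Int) : Int :=
  if _h : cobblestone ≥ 3 then
    if sticks ≥ 2 then
      stone_pick_loop (cobblestone - 3) (sticks - 2) (res + 1)
    else res
  else res
termination_by cobblestone.toNat
decreasing_by omega

def stone_pick (arr : List String) : Int :=
  let st := arr.foldl (fun (p : Int × Int) e =>
    if e == "Cobblestone" then (p.1 + 1, p.2)
    else if e == "Sticks" then (p.1, p.2 + 1)
    else if e == "Wood" then (p.1, p.2 + 4)
    else p) (0, 0)
  stone_pick_loop st.1 st.2 0

-- ===== PORT B =====
def stone_pick_alt (arr : List String) : Int :=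
  let cobblestone : Int := PySem.List.count arr "Cobblestone"
  let sticks : Int := PySem.List.count arr "Sticks" + 4 * PySem.List.count arr "Wood"
  min (PySem.Int.floordiv cobblestone 3) (PySem.Int.floordiv sticks 2)

-- ===== PRECONDITION & SPEC =====
def Spec_stone_pick (arr : List String) (out : Int) : Prop := out = stone_pick_alt arr
instance (arr : List String) (out : Int) : Decidable (Spec_stone_pick arr out) := by unfold Spec_stone_pick; infer_instance

-- ===== CLAIM (what is proved, stated in full; the proofs are below) =====
def Claim_equal_stone_pick : Prop := ∀ (arr : List String), Dom_stone_pick arr → Spec_stone_pick arr (stone_pick arr)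

-- ===== LEMMAS AND PROOFS =====

-- A's while-loop computes the closed form res + min (c / 3) (s / 2) for nonnegative c, s.
theorem stone_pick_loop_closed (c s res : Int) (hc : 0 ≤ c) (hs : 0 ≤ s) :
    stone_pick_loop c s res = res + min (PySem.Int.floordiv c 3) (PySem.Int.floordiv s 2) := by
  rw [PySem.Int.floordiv_eq_ediv_of_pos (by omega : (0:Int) < 3),
      PySem.Int.floordiv_eq_ediv_of_pos (by omega : (0:Int) < 2)]
  induction c, s, res using stone_pick_loop.induct with
  | case1 c s res h h2 ih =>
    rw [stone_pick_loop, dif_pos h, if_pos h2, ih (by omega) (by omega)]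
    have h3 : (c - 3) / 3 = c / 3 - 1 := by omega
    have h4 : (s - 2) / 2 = s / 2 - 1 := by omega
    rw [h3, h4]
    have hc3 : 1 ≤ c / 3 := by omega
    have hs2 : 1 ≤ s / 2 := by omega
    omega
  | case2 c s res h h2 =>
    rw [stone_pick_loop, dif_pos h, if_neg h2]
    have : s / 2 = 0 := by omega
    have : 0 ≤ c / 3 := by omega
    omega
  | case3 c s res h =>
    rw [stone_pick_loop, dif_neg h]
    have : c / 3 = 0 := by omega
    have : 0 ≤ s / 2 := by omega
    omega

-- A's counting fold computes the counts of "Cobblestone" and of "Sticks"/"Wood" (the latter weighted 4).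
theorem stone_pick_fold_count (arr : List String) (a b : Int) :
    arr.foldl (fun (p : Int × Int) e =>
      if e == "Cobblestone" then (p.1 + 1, p.2)
      else if e == "Sticks" then (p.1, p.2 + 1)
      else if e == "Wood" then (p.1, p.2 + 4)
      else p) (a, b)
    = (a + arr.count "Cobblestone", b + arr.count "Sticks" + 4 * arr.count "Wood") := by
  induction arr generalizing a b with
  | nil => simp
  | cons x t ih =>
    by_cases h1 : x = "Cobblestone" <;> by_cases h2 : x = "Sticks" <;>
      by_cases h3 : x = "Wood" <;>
      simp_all [List.foldl, ih, Prod.mk.injEq] <;> omega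

-- ===== VERDICT (by name: the statement is the Claim_ definition above) =====
theorem stone_pick_spec : Claim_equal_stone_pick := by
  intro arr _
  show stone_pick arr = stone_pick_alt arr
  unfold stone_pick stone_pick_alt
  rw [stone_pick_fold_count]
  simp only [PySem.List.count_eq]
  rw [stone_pick_loop_closed _ _ _ (by positivity) (by positivity)]
  ring_nf
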